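-- pv_equiv track=rewrite | github.com/skrishna1978/CodingChallenge | 3.25.2019 | bowlingPinProcessor.py | bowlingPins
-- ===== SOURCE A (Python) =====
-- def bowlingPins(array):     #function starts here
--
--     #matrix representing the value assigned to each of the pins. 0 represents SPACES.
--     pinArrangement = [[7, 0, 8, 0, 9, 0, 10],
--                       [0, 4, 0, 5, 0, 6, 0],
--                       [0, 0, 2, 0, 3, 0, 0],
--                       [0, 0, 0, 1, 0, 0, 0]]
--     finalGrid = ""          #to hold the final pin arrangement.
--
--     #loop through the 2d array
--     for row in range(len(pinArrangement)):                                                  #loop through 4 rows (0-3)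
--         for col in range(len(pinArrangement[row])):                                         #loop through 7 columns (0-6)
--             if pinArrangement[row][col] != 0 and pinArrangement[row][col] not in array:     #if [row][col] element not in array AND [row][col] not a 0
--                 finalGrid = finalGrid + "|"                                                 #add a pin to that place (it wasn't knocked down)
--             else:
--                 finalGrid = finalGrid + " "                                                 #else add a SPACE to that spot. Indicating, it was removed.
--         #end of inner loop
--         finalGrid = finalGrid + "\n"                                                        #outer loop NEWLINE after each COL
--     #end of outer loop
--     return finalGrid                                                                        #return final output back
-- ===== SOURCE B (Python) =====
-- def bowlingPins(array):
--     # pin number -> (row, col) in the 4x7 display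
--     positions = {7: (0, 0), 8: (0, 2), 9: (0, 4), 10: (0, 6),
--                  4: (1, 1), 5: (1, 3), 6: (1, 5),
--                  2: (2, 2), 3: (2, 4),
--                  1: (3, 3)}
--     grid = [[' '] * 7 for _ in range(4)]
--     for pin, (r, c) in positions.items():
--         if pin not in array:
--             grid[r][c] = '|'
--     return ''.join(''.join(row) + '\n' for row in grid)
-- ===== Notes on version B (the rewrite author's own statement) =====
-- stated objective: alternative
-- what changed: B replaces A's 28-cell scan of a sentinel matrix (building the string cell by cell) with a pin->coordinate map: it seeds a blank 4x7 character grid, sets '|' only at the ten pin positions not knocked down, then joins the rows.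
import Mathlib
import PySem

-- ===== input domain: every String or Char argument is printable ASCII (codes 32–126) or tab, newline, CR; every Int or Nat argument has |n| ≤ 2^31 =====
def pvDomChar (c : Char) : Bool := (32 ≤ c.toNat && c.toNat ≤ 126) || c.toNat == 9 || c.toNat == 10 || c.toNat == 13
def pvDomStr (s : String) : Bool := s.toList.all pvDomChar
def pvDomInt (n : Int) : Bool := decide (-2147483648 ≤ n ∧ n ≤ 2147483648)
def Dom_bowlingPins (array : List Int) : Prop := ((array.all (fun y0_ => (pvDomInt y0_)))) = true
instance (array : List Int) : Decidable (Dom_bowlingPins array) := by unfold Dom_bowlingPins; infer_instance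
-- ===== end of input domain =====

-- B renders the pin grid from a pin→coordinate map over a blank 4×7 grid instead of A's
-- cell-by-cell scan of a sentinel matrix (objective: alternative decomposition).

-- ===== PORT A =====
-- literal transliteration: scan the 4×7 sentinel matrix, appending '|' or ' ' per cell
def bowlingPins (array : List Int) : String :=
  let pinArrangement : List (List Int) :=
    [[7, 0, 8, 0, 9, 0, 10],
     [0, 4, 0, 5, 0, 6, 0],
     [0, 0, 2, 0, 3, 0, 0],
     [0, 0, 0, 1, 0, 0, 0]]
  pinArrangement.foldl (fun finalGrid rowL =>
    (rowL.foldl (fun g p =>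
      if p != 0 && !(array.contains p) then g ++ "|" else g ++ " ") finalGrid) ++ "\n") ""

-- ===== PORT B =====
-- pin number ↦ (row, col) of its place in the display (Source B's `positions` dict, in order)
def pinPositions : List (Int × Nat × Nat) :=
  [(7, 0, 0), (8, 0, 2), (9, 0, 4), (10, 0, 6),
   (4, 1, 1), (5, 1, 3), (6, 1, 5),
   (2, 2, 2), (3, 2, 4),
   (1, 3, 3)]

def bowlingPins_alt (array : List Int) : String :=
  let grid0 : List (List Char) := List.replicate 4 (List.replicate 7 ' ')
  let grid := pinPositions.foldl (fun g prc =>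
    match prc with
    | (pin, r, c) =>
      if !(array.contains pin) then g.set r ((g.getD r []).set c '|') else g) grid0
  String.join (grid.map (fun row => String.ofList row ++ "\n"))

-- ===== PRECONDITION & SPEC =====
def Spec_bowlingPins (array : List Int) (out : String) : Prop := out = bowlingPins_alt array
instance (array : List Int) (out : String) : Decidable (Spec_bowlingPins array out) := by unfold Spec_bowlingPins; infer_instance

-- ===== CLAIM (what is proved, stated in full; the proofs are below) =====
def Claim_equal_bowlingPins : Prop := ∀ (array : List Int), Dom_bowlingPins array → Spec_bowlingPins array (bowlingPins array)

-- ===== LEMMAS AND PROOFS =====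

-- membership oracle for the ten pins, given one Bool per pin
def memF (b1 b2 b3 b4 b5 b6 b7 b8 b9 b10 : Bool) : Int → Bool :=
  fun p =>
    if p = 1 then b1 else if p = 2 then b2 else if p = 3 then b3 else
    if p = 4 then b4 else if p = 5 then b5 else if p = 6 then b6 else
    if p = 7 then b7 else if p = 8 then b8 else if p = 9 then b9 else
    if p = 10 then b10 else false

-- A's computation with membership abstracted to ten Bools
def fA (b1 b2 b3 b4 b5 b6 b7 b8 b9 b10 : Bool) : String :=
  let m := memF b1 b2 b3 b4 b5 b6 b7 b8 b9 b10
  let pinArrangement : List (List Int) :=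
    [[7, 0, 8, 0, 9, 0, 10],
     [0, 4, 0, 5, 0, 6, 0],
     [0, 0, 2, 0, 3, 0, 0],
     [0, 0, 0, 1, 0, 0, 0]]
  pinArrangement.foldl (fun finalGrid rowL =>
    (rowL.foldl (fun g p =>
      if p != 0 && !(m p) then g ++ "|" else g ++ " ") finalGrid) ++ "\n") ""

-- B's computation with membership abstracted to ten Bools
def fB (b1 b2 b3 b4 b5 b6 b7 b8 b9 b10 : Bool) : String :=
  let m := memF b1 b2 b3 b4 b5 b6 b7 b8 b9 b10
  let grid0 : List (List Char) := List.replicate 4 (List.replicate 7 ' ')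
  let grid := pinPositions.foldl (fun g prc =>
    match prc with
    | (pin, r, c) =>
      if !(m pin) then g.set r ((g.getD r []).set c '|') else g) grid0
  String.join (grid.map (fun row => String.ofList row ++ "\n"))

lemma hA (array : List Int) :
    bowlingPins array =
      fA (array.contains 1) (array.contains 2) (array.contains 3) (array.contains 4)
         (array.contains 5) (array.contains 6) (array.contains 7) (array.contains 8)
         (array.contains 9) (array.contains 10) := by
  rfl

set_option maxHeartbeats 2000000 in
lemma hB (array : List Int) :
    bowlingPins_alt array =
      fB (array.contains 1) (array.contains 2) (array.contains 3) (array.contains 4)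
         (array.contains 5) (array.contains 6) (array.contains 7) (array.contains 8)
         (array.contains 9) (array.contains 10) := by
  rfl

set_option maxHeartbeats 4000000 in
lemma key : ∀ b1 b2 b3 b4 b5 b6 b7 b8 b9 b10 : Bool,
    fA b1 b2 b3 b4 b5 b6 b7 b8 b9 b10 = fB b1 b2 b3 b4 b5 b6 b7 b8 b9 b10 := by
  decide

-- ===== VERDICT (by name: the statement is the Claim_ definition above) =====
theorem bowlingPins_spec : Claim_equal_bowlingPins := by
  intro array _
  unfold Spec_bowlingPins
  rw [hA, hB, key]
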